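-- pv_equiv track=rewrite | github.com/aleksandre-svg/GOAhomeworks | level 60/homework/hw4.py | proofread
-- ===== SOURCE A (Python) =====
-- def proofread(st):
--     st = st.lower()
--     st = st.replace('ie', 'ei')
--     st = st.capitalize()
--     sign = False
--     tmp = ''
--     for c in st:
--         if sign and str.isalpha(c):
--             tmp += c.upper()
--             sign = False
--         else:
--             tmp += c
--             if c == '.':
--                 sign = True
--     return tmp
-- ===== SOURCE B (Python) =====
-- def _cap_first_alpha(seg):
--     for i, c in enumerate(seg):
--         if c.isalpha():
--             return seg[:i] + c.upper() + seg[i + 1:]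
--     return seg
--
--
-- def proofread(st):
--     st = st.lower().replace('ie', 'ei').capitalize()
--     segs = st.split('.')
--     return '.'.join([segs[0]] + [_cap_first_alpha(seg) for seg in segs[1:]])
-- ===== Notes on version B (the rewrite author's own statement) =====
-- stated objective: alternative
-- what changed: Replaced the sticky-flag character scan with splitting on the period, uppercasing the first alphabetic character of each segment after the first, and rejoining the segments.
import Mathlib
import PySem

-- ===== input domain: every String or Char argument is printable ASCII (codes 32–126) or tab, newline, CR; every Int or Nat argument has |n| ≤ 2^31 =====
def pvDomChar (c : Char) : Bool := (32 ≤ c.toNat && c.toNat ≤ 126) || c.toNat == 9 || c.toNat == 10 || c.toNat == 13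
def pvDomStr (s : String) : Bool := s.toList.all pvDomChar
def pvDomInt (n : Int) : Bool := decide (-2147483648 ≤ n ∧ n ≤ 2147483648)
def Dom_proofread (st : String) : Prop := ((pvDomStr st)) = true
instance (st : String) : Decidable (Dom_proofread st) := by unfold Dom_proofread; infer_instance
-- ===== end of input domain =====

-- B replaces A's sticky-flag character scan by split-on-'.' / uppercase first alpha of each later segment / rejoin (alternative decomposition; a timing run measured B faster by a constant factor: bulk split/join instead of per-character appends).

-- ===== PORT A =====
-- str.capitalize() ported by hand: first char titlecased, rest lowercased — exact on ASCII, where titlecase = uppercase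
def pyCapitalize (cs : List Char) : List Char :=
  match cs with
  | [] => []
  | c :: rest => PySem.Chars.upperChar c :: rest.map PySem.Chars.lowerChar

def proofread (st : String) : String :=
  let s3 := pyCapitalize (PySem.Chars.replace (PySem.Chars.lower st.toList) ['i', 'e'] ['e', 'i'])
  let r := s3.foldl
    (fun (acc : Bool × List Char) c =>
      if acc.1 && PySem.Chars.isalpha c then (false, acc.2 ++ [PySem.Chars.upperChar c])
      else ((if c == '.' then true else acc.1), acc.2 ++ [c]))
    (false, [])
  String.ofList r.2

-- ===== PORT B =====
-- the for-loop of _cap_first_alpha: uppercase the first alphabetic character, leave the rest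
def capFirstAlpha (seg : List Char) : List Char :=
  match seg with
  | [] => []
  | c :: rest =>
      if PySem.Chars.isalpha c then PySem.Chars.upperChar c :: rest
      else c :: capFirstAlpha rest

def proofread_alt (st : String) : String :=
  let s := pyCapitalize (PySem.Chars.replace (PySem.Chars.lower st.toList) ['i', 'e'] ['e', 'i'])
  match PySem.Chars.splitOn s ['.'] with
  | [] => String.ofList (PySem.Chars.join ['.'] [])   -- unreachable: split never yields []
  | h :: t => String.ofList (PySem.Chars.join ['.'] (h :: t.map capFirstAlpha))

-- ===== PRECONDITION & SPEC =====
def Spec_proofread (st : String) (out : String) : Prop := out = proofread_alt st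
instance (st : String) (out : String) : Decidable (Spec_proofread st out) := by unfold Spec_proofread; infer_instance

-- ===== CLAIM (what is proved, stated in full; the proofs are below) =====
def Claim_equal_proofread : Prop := ∀ (st : String), Dom_proofread st → Spec_proofread st (proofread st)

-- ===== LEMMAS AND PROOFS =====

-- the tail of A's loop: the characters it appends after state `sign`, input `cs`
def run (sign : Bool) (cs : List Char) : List Char :=
  match cs with
  | [] => []
  | c :: rest =>
      if sign && PySem.Chars.isalpha c then PySem.Chars.upperChar c :: run false rest
      else c :: run (if c == '.' then true else sign) rest

-- plain recursive split on '.', used to characterise PySem.Chars.splitOn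
def mySplit (cs : List Char) : List (List Char) :=
  match cs with
  | [] => [[]]
  | c :: rest =>
      if c == '.' then [] :: mySplit rest
      else
        match mySplit rest with
        | [] => [[c]]
        | h :: t => (c :: h) :: t

lemma mySplit_ne_nil (cs : List Char) : mySplit cs ≠ [] := by
  cases cs with
  | nil => simp [mySplit]
  | cons c rest =>
      simp only [mySplit]
      split
      · simp
      · split <;> simp

lemma foldl_run (cs : List Char) (sign : Bool) (tmp : List Char) :
    (cs.foldl
      (fun (acc : Bool × List Char) c =>
        if acc.1 && PySem.Chars.isalpha c then (false, acc.2 ++ [PySem.Chars.upperChar c])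
        else ((if c == '.' then true else acc.1), acc.2 ++ [c]))
      (sign, tmp)).2 = tmp ++ run sign cs := by
  induction cs generalizing sign tmp with
  | nil => simp [run]
  | cons c rest ih =>
      simp only [List.foldl_cons]
      by_cases h : (sign && PySem.Chars.isalpha c) = true
      · rw [if_pos h, ih]; simp [run, h]
      · rw [if_neg h, ih]; simp [run, h]

def consHead (pre : List Char) (l : List (List Char)) : List (List Char) :=
  match l with
  | [] => [pre]
  | h :: t => (pre ++ h) :: t

lemma go_eq (fuel : Nat) (l cur : List Char) (hrest : List (List Char))
    (hf : l.length < fuel) :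
    PySem.Chars.splitOn.go ['.'] fuel l cur hrest =
      hrest.reverse ++ consHead cur.reverse (mySplit l) := by
  induction fuel generalizing l cur hrest with
  | zero => omega
  | succ f ih =>
      cases l with
      | nil =>
          simp [PySem.Chars.splitOn.go, mySplit, consHead]
      | cons c rest =>
          simp only [PySem.Chars.splitOn.go]
          by_cases hc : c = '.'
          · subst hc
            have hpre : List.isPrefixOf ['.'] ('.' :: rest) = true := by
              simp [List.isPrefixOf]
            simp only [hpre, if_true, List.length_cons] at *
            have hd : List.drop (List.length ([] : List Char) + 1) ('.' :: rest) = rest := rfl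
            rw [hd, ih rest [] (cur.reverse :: hrest) (by simpa using Nat.lt_of_succ_lt_succ hf)]
            simp [mySplit, consHead]
            cases h : mySplit rest with
            | nil => exact absurd h (mySplit_ne_nil rest)
            | cons a b => rfl
          · have hpre : List.isPrefixOf ['.'] (c :: rest) = false := by
              simp [List.isPrefixOf]
              intro h; exact absurd h.symm hc
            simp only [hpre, Bool.false_eq_true, if_false]
            rw [ih rest (c :: cur) hrest (by simpa using Nat.lt_of_succ_lt_succ hf)]
            simp only [mySplit, beq_iff_eq, hc, if_false]
            cases h : mySplit rest with
            | nil => exact absurd h (mySplit_ne_nil rest)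
            | cons a b => simp [consHead]

lemma splitOn_eq_mySplit (cs : List Char) :
    PySem.Chars.splitOn cs ['.'] = mySplit cs := by
  unfold PySem.Chars.splitOn
  rw [go_eq cs.length.succ cs [] [] (Nat.lt_succ_self _)]
  cases h : mySplit cs with
  | nil => exact absurd h (mySplit_ne_nil cs)
  | cons a b => simp [consHead]

def mapTail (f : List Char → List Char) (l : List (List Char)) : List (List Char) :=
  match l with
  | [] => []
  | h :: t => h :: t.map f

lemma join_cons (x : List Char) (y : List Char) (t : List (List Char)) :
    PySem.Chars.join ['.'] ((x) :: y :: t) =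
      x ++ '.' :: PySem.Chars.join ['.'] (y :: t) := by
  simp [PySem.Chars.join, List.intercalate]

lemma join_cons_head (u : Char) (a : List Char) (L : List (List Char)) :
    PySem.Chars.join ['.'] ((u :: a) :: L) = u :: PySem.Chars.join ['.'] (a :: L) := by
  cases L with
  | nil => simp [PySem.Chars.join, List.intercalate]
  | cons l ls => rw [join_cons, join_cons]; simp

lemma run_split (cs : List Char) :
    run true cs = PySem.Chars.join ['.'] ((mySplit cs).map capFirstAlpha) ∧
    run false cs = PySem.Chars.join ['.'] (mapTail capFirstAlpha (mySplit cs)) := by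
  induction cs with
  | nil => simp [run, mySplit, mapTail, capFirstAlpha, PySem.Chars.join, List.intercalate]
  | cons c rest ih =>
      obtain ⟨ih1, ih2⟩ := ih
      cases h : mySplit rest with
      | nil => exact absurd h (mySplit_ne_nil rest)
      | cons a b =>
      rw [h] at ih1 ih2
      by_cases hc : c = '.'
      · subst hc
        have hal : PySem.Chars.isalpha '.' = false := by decide
        have hsplit : mySplit ('.' :: rest) = [] :: a :: b := by
          simp [mySplit, h]
        constructor
        · rw [hsplit]
          simp only [run, hal, Bool.and_false, Bool.false_eq_true, if_false, beq_self_eq_true,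
            if_true, List.map_cons, capFirstAlpha]
          rw [join_cons]
          simp [ih1]
        · rw [hsplit]
          simp only [run, hal, Bool.and_false, Bool.false_eq_true, if_false, beq_self_eq_true,
            if_true, mapTail]
          rw [List.map_cons, join_cons]
          simp [ih1]
      · have hsplit : mySplit (c :: rest) = (c :: a) :: b := by
          simp [mySplit, hc, h]
        have hmt : mapTail capFirstAlpha (a :: b) = a :: b.map capFirstAlpha := rfl
        rw [hmt] at ih2
        constructor
        · by_cases ha : PySem.Chars.isalpha c = true
          · rw [hsplit]
            simp only [run, ha, Bool.and_true, if_true, List.map_cons, capFirstAlpha]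
            rw [join_cons_head]
            simp [ih2]
          · rw [hsplit]
            simp only [run, ha, Bool.and_false, Bool.false_eq_true, if_false, beq_iff_eq, hc,
              List.map_cons, capFirstAlpha]
            rw [join_cons_head]
            simp [ih1]
        · rw [hsplit]
          simp only [run, Bool.false_and, Bool.false_eq_true, if_false, beq_iff_eq, hc, mapTail]
          rw [join_cons_head]
          simp [ih2]

-- ===== VERDICT (by name: the statement is the Claim_ definition above) =====
theorem proofread_spec : Claim_equal_proofread := by
  intro st _
  unfold Spec_proofread proofread proofread_alt
  simp only
  rw [foldl_run, (run_split _).2, splitOn_eq_mySplit]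
  cases h : mySplit (pyCapitalize (PySem.Chars.replace (PySem.Chars.lower st.toList) ['i', 'e'] ['e', 'i'])) with
  | nil => exact absurd h (mySplit_ne_nil _)
  | cons a b => simp [mapTail]
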